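-- pv_equiv track=rewrite | github.com/kluzzebass/imux | .cursor/hooks/guard_issue_close.py | _split_top_level_chain
-- ===== SOURCE A (Python) =====
-- def _split_top_level_chain(cmd: str) -> list[str]:
--     """Split on && / ; only outside quotes (so JSON/string payloads are not split)."""
--     segs: list[str] = []
--     cur: list[str] = []
--     i = 0
--     sq = dq = False
--     depth_paren = 0
--     n = len(cmd)
--     while i < n:
--         c = cmd[i]
--         if sq:
--             cur.append(c)
--             if c == "'":
--                 sq = False
--             i += 1
--             continue
--         if dq:
--             cur.append(c)
--             if c == "\\" and i + 1 < n:
--                 cur.append(cmd[i + 1])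
--                 i += 2
--                 continue
--             if c == '"':
--                 dq = False
--             i += 1
--             continue
--         if c == "'":
--             sq = True
--             cur.append(c)
--             i += 1
--             continue
--         if c == '"':
--             dq = True
--             cur.append(c)
--             i += 1
--             continue
--         if c == "(":
--             depth_paren += 1
--             cur.append(c)
--             i += 1
--             continue
--         if c == ")" and depth_paren > 0:
--             depth_paren -= 1
--             cur.append(c)
--             i += 1
--             continue
--         if depth_paren == 0 and i + 1 < n and cmd[i : i + 2] == "&&":
--             s = "".join(cur).strip()
--             if s:
--                 segs.append(s)
--             cur = []
--             i += 2
--             continue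
--         if depth_paren == 0 and c == ";":
--             s = "".join(cur).strip()
--             if s:
--                 segs.append(s)
--             cur = []
--             i += 1
--             continue
--         cur.append(c)
--         i += 1
--     tail = "".join(cur).strip()
--     if tail:
--         segs.append(tail)
--     return segs
-- ===== SOURCE B (Python) =====
-- def _split_top_level_chain(cmd: str) -> list[str]:
--     """Two-pass: first record the spans between top-level && / ; delimiters
--     (same quote/paren state machine, but no buffer), then slice+strip them."""
--     spans: list[tuple[int, int]] = []
--     i = 0
--     start = 0
--     sq = dq = False
--     depth_paren = 0
--     n = len(cmd)
--     while i < n: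
--         c = cmd[i]
--         if sq:
--             if c == "'":
--                 sq = False
--             i += 1
--         elif dq:
--             if c == "\\" and i + 1 < n:
--                 i += 2
--             else:
--                 if c == '"':
--                     dq = False
--                 i += 1
--         elif c == "'":
--             sq = True
--             i += 1
--         elif c == '"':
--             dq = True
--             i += 1
--         elif c == "(":
--             depth_paren += 1
--             i += 1
--         elif c == ")" and depth_paren > 0:
--             depth_paren -= 1
--             i += 1
--         elif depth_paren == 0 and cmd.startswith("&&", i):
--             spans.append((start, i))
--             i += 2
--             start = i
--         elif depth_paren == 0 and c == ";":
--             spans.append((start, i))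
--             i += 1
--             start = i
--         else:
--             i += 1
--     spans.append((start, n))
--     out: list[str] = []
--     for a, b in spans:
--         s = cmd[a:b].strip()
--         if s:
--             out.append(s)
--     return out
-- ===== Notes on version B (the rewrite author's own statement) =====
-- stated objective: alternative
-- what changed: B separates boundary detection from segment extraction: a first pass runs the quote/paren state machine recording only the (start, end) spans between top-level delimiters (no character buffer), and a second pass slices the original string, strips and filters the segments.
import Mathlib
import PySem

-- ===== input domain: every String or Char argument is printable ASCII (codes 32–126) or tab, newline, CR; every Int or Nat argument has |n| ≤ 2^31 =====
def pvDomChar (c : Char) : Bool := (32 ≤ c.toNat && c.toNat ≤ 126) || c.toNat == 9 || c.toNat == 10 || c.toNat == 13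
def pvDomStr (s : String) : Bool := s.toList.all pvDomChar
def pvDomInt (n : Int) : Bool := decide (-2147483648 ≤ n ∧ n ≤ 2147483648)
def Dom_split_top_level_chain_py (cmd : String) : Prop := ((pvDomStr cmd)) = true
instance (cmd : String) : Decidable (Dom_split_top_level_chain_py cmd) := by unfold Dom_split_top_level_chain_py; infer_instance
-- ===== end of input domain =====

-- B replaces A's interleaved buffer-building with a boundary-recording first pass
-- and a slice+strip second pass (different decomposition, same cost).

-- ===== PORT A =====
-- literal transliteration of A's while-loop over the remaining characters;
-- cur/segs are the Python lists, depth the Python int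
def loopA (cs : List Char) (sq dq : Bool) (depth : Int) (cur : List Char) (segs : List String) : List String :=
  match cs with
  | [] =>
      let tail := PySem.Str.strip (String.mk cur)
      if tail ≠ "" then segs ++ [tail] else segs
  | c :: rest =>
      if sq then loopA rest (if c = '\'' then false else sq) dq depth (cur ++ [c]) segs
      else if dq then
        if c = '\\' then
          match rest with
          | d :: rest' => loopA rest' sq dq depth (cur ++ [c] ++ [d]) segs
          | [] => loopA [] sq (if c = '"' then false else dq) depth (cur ++ [c]) segs
        else loopA rest sq (if c = '"' then false else dq) depth (cur ++ [c]) segs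
      else if c = '\'' then loopA rest true dq depth (cur ++ [c]) segs
      else if c = '"' then loopA rest sq true depth (cur ++ [c]) segs
      else if c = '(' then loopA rest sq dq (depth + 1) (cur ++ [c]) segs
      else if c = ')' ∧ depth > 0 then loopA rest sq dq (depth - 1) (cur ++ [c]) segs
      else if depth = 0 ∧ c = '&' ∧ rest.head? = some '&' then
        let s := PySem.Str.strip (String.mk cur)
        loopA rest.tail sq dq depth [] (if s ≠ "" then segs ++ [s] else segs)
      else if depth = 0 ∧ c = ';' then
        let s := PySem.Str.strip (String.mk cur)
        loopA rest sq dq depth [] (if s ≠ "" then segs ++ [s] else segs)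
      else loopA rest sq dq depth (cur ++ [c]) segs
termination_by cs.length
decreasing_by all_goals (simp_all [List.length_tail]; try omega)

def split_top_level_chain_py (cmd : String) : List String :=
  loopA cmd.toList false false 0 [] []

-- ===== PORT B =====
-- first pass of Source B: same state machine, but it only records the (start, i) spans
def passB (cs : List Char) (i start : Nat) (sq dq : Bool) (depth : Int) : List (Nat × Nat) :=
  match cs with
  | [] => [(start, i)]
  | c :: rest =>
      if sq then passB rest (i + 1) start (if c = '\'' then false else sq) dq depth
      else if dq then
        if c = '\\' then
          match rest with
          | _ :: rest' => passB rest' (i + 2) start sq dq depth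
          | [] => passB [] (i + 1) start sq (if c = '"' then false else dq) depth
        else passB rest (i + 1) start sq (if c = '"' then false else dq) depth
      else if c = '\'' then passB rest (i + 1) start true dq depth
      else if c = '"' then passB rest (i + 1) start sq true depth
      else if c = '(' then passB rest (i + 1) start sq dq (depth + 1)
      else if c = ')' ∧ depth > 0 then passB rest (i + 1) start sq dq (depth - 1)
      else if depth = 0 ∧ c = '&' ∧ rest.head? = some '&' then
        (start, i) :: passB rest.tail (i + 2) (i + 2) sq dq depth
      else if depth = 0 ∧ c = ';' then
        (start, i) :: passB rest (i + 1) (i + 1) sq dq depth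
      else passB rest (i + 1) start sq dq depth
termination_by cs.length
decreasing_by all_goals (simp_all [List.length_tail]; try omega)

-- cmd[a:b] for the nonnegative indices pass1 produces (exact: PySem.List.slice_natCast)
def sliceStr (cs : List Char) (a b : Nat) : String := String.mk ((cs.drop a).take (b - a))

-- second pass of Source B: slice, strip, keep the non-empty ones
def split_top_level_chain_py_alt (cmd : String) : List String :=
  (passB cmd.toList 0 0 false false 0).foldl
    (fun out ab =>
      let s := PySem.Str.strip (sliceStr cmd.toList ab.1 ab.2)
      if s ≠ "" then out ++ [s] else out) []

-- ===== PRECONDITION & SPEC =====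
def Spec_split_top_level_chain_py (cmd : String) (out : List String) : Prop := out = split_top_level_chain_py_alt cmd
instance (cmd : String) (out : List String) : Decidable (Spec_split_top_level_chain_py cmd out) := by unfold Spec_split_top_level_chain_py; infer_instance

-- ===== CLAIM (what is proved, stated in full; the proofs are below) =====
def Claim_equal_split_top_level_chain_py : Prop := ∀ (cmd : String), Dom_split_top_level_chain_py cmd → Spec_split_top_level_chain_py cmd (split_top_level_chain_py cmd)

-- ===== LEMMAS AND PROOFS =====

lemma drop_succ_of_drop_cons {L rest : List Char} {c : Char} {i : Nat}
    (h : L.drop i = c :: rest) : L.drop (i + 1) = rest := by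
  rw [← List.drop_drop, h]; rfl

lemma take_snoc_of_drop_cons {L rest : List Char} {c : Char} {start i : Nat}
    (hle : start ≤ i) (h : L.drop i = c :: rest) :
    (L.drop start).take (i - start) ++ [c] = (L.drop start).take (i + 1 - start) := by
  have hget : (L.drop start)[i - start]? = some c := by
    rw [List.getElem?_drop]
    have : (L.drop i)[0]? = some c := by rw [h]; rfl
    rw [List.getElem?_drop] at this
    simpa [Nat.add_sub_cancel' hle] using this
  have : i + 1 - start = (i - start) + 1 := by omega
  rw [this, List.take_succ, hget]
  rfl

lemma main_loop (L : List Char) : ∀ (n : Nat) (cs : List Char) (i start : Nat)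
    (sq dq : Bool) (depth : Int) (segs : List String),
    cs.length ≤ n → start ≤ i → L.drop i = cs →
    loopA cs sq dq depth ((L.drop start).take (i - start)) segs
      = (passB cs i start sq dq depth).foldl
          (fun out ab =>
            let s := PySem.Str.strip (sliceStr L ab.1 ab.2)
            if s ≠ "" then out ++ [s] else out) segs := by
  intro n
  induction n with
  | zero =>
      intro cs i start sq dq depth segs hn _ _
      have : cs = [] := by simpa using List.length_eq_zero_iff.mp (Nat.le_zero.mp hn)
      subst this
      simp [loopA, passB, sliceStr]
  | succ n ih =>
      intro cs i start sq dq depth segs hn hle hdrop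
      match cs with
      | [] => simp [loopA, passB, sliceStr]
      | c :: rest =>
        have hrest : L.drop (i + 1) = rest := drop_succ_of_drop_cons hdrop
        have hsnoc := take_snoc_of_drop_cons hle hdrop
        have hn' : rest.length ≤ n := by simpa using hn
        rw [loopA.eq_def, passB.eq_def]; dsimp only
        by_cases hsq : sq = true
        · rw [if_pos hsq, if_pos hsq, hsnoc]
          exact ih rest (i+1) start _ dq depth segs hn' (by omega) hrest
        · rw [if_neg hsq, if_neg hsq]
          by_cases hdq : dq = true
          · rw [if_pos hdq, if_pos hdq]
            by_cases hc : c = '\\'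
            · rw [if_pos hc, if_pos hc]
              match rest with
              | [] =>
                  dsimp only
                  rw [hsnoc]
                  exact ih [] (i+1) start _ _ depth segs (by simp) (by omega) hrest
              | d :: rest' =>
                  dsimp only
                  have hrest' : L.drop (i + 2) = rest' := by
                    have := drop_succ_of_drop_cons hrest
                    simpa [Nat.add_assoc] using this
                  have hsnoc2 := take_snoc_of_drop_cons (by omega : start ≤ i + 1) hrest
                  rw [show (L.drop start).take (i - start) ++ [c] ++ [d]
                        = ((L.drop start).take (i - start) ++ [c]) ++ [d] from rfl]
                  rw [hsnoc, hsnoc2]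
                  rw [show i + 1 + 1 = i + 2 from rfl]
                  exact ih rest' (i+2) start _ _ depth segs (by simp at hn'; omega) (by omega) hrest'
            · rw [if_neg hc, if_neg hc, hsnoc]
              exact ih rest (i+1) start _ _ depth segs hn' (by omega) hrest
          · rw [if_neg hdq, if_neg hdq]
            by_cases h1 : c = '\''
            · rw [if_pos h1, if_pos h1, hsnoc]
              exact ih rest (i+1) start true dq depth segs hn' (by omega) hrest
            · rw [if_neg h1, if_neg h1]
              by_cases h2 : c = '"'
              · rw [if_pos h2, if_pos h2, hsnoc]
                exact ih rest (i+1) start sq true depth segs hn' (by omega) hrest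
              · rw [if_neg h2, if_neg h2]
                by_cases h3 : c = '('
                · rw [if_pos h3, if_pos h3, hsnoc]
                  exact ih rest (i+1) start sq dq (depth+1) segs hn' (by omega) hrest
                · rw [if_neg h3, if_neg h3]
                  by_cases h4 : c = ')' ∧ depth > 0
                  · rw [if_pos h4, if_pos h4, hsnoc]
                    exact ih rest (i+1) start sq dq (depth-1) segs hn' (by omega) hrest
                  · rw [if_neg h4, if_neg h4]
                    by_cases h5 : depth = 0 ∧ c = '&' ∧ rest.head? = some '&'
                    · rw [if_pos h5, if_pos h5]
                      have hrest2 : L.drop (i + 2) = rest.tail := by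
                        match rest, h5.2.2 with
                        | _ :: r, _ =>
                          have := drop_succ_of_drop_cons hrest
                          simpa [Nat.add_assoc] using this
                      have hcur' : String.mk ((L.drop start).take (i - start)) = sliceStr L start i := rfl
                      rw [List.foldl_cons]
                      dsimp only
                      rw [hcur']
                      have htl : rest.tail.length ≤ n := by
                        match rest, h5.2.2 with
                        | _ :: r, _ => simp at hn' ⊢; omega
                      simpa using ih rest.tail (i+2) (i+2) sq dq depth _ htl (le_refl _) hrest2
                    · rw [if_neg h5, if_neg h5]
                      by_cases h6 : depth = 0 ∧ c = ';'
                      · rw [if_pos h6, if_pos h6]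
                        have hcur' : String.mk ((L.drop start).take (i - start)) = sliceStr L start i := rfl
                        rw [List.foldl_cons]
                        dsimp only
                        rw [hcur']
                        simpa using ih rest (i+1) (i+1) sq dq depth _ hn' (le_refl _) hrest
                      · rw [if_neg h6, if_neg h6, hsnoc]
                        exact ih rest (i+1) start sq dq depth segs hn' (by omega) hrest

-- ===== VERDICT (by name: the statement is the Claim_ definition above) =====
theorem split_top_level_chain_py_spec : Claim_equal_split_top_level_chain_py := by
  intro cmd _
  unfold Spec_split_top_level_chain_py split_top_level_chain_py split_top_level_chain_py_alt
  have := main_loop cmd.toList cmd.toList.length cmd.toList 0 0 false false 0 []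
    (le_refl _) (le_refl _) (by simp)
  simpa using this
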